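-- pv_equiv track=rewrite | github.com/rasuldeb25/dev | linguistBuddyAi/groq_back_up.py | safe_escape
-- ===== SOURCE A (Python) =====
-- def safe_escape(text):
--     if not text: return ""
--     parts = text.split("```")
--     final = ""
--     for i, part in enumerate(parts):
--         if i % 2 == 0:
--             for char in r"_*[]()~>#+-=|{}.!":
--                 part = part.replace(char, "\\" + char)
--             final += part
--         else:
--             final += f"```\n{part}\n```"
--     return final
-- ===== SOURCE B (Python) =====
-- ESCAPE_CHARS = set(r"_*[]()~>#+-=|{}.!")
--
-- def safe_escape(text):
--     # one left-to-right scan per plain segment instead of 18 full-string replace passes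
--     if not text:
--         return ""
--     out = []
--     for i, part in enumerate(text.split("```")):
--         if i % 2:
--             out.append("```\n" + part + "\n```")
--         else:
--             out.append("".join("\\" + c if c in ESCAPE_CHARS else c for c in part))
--     return "".join(out)
-- ===== Notes on version B (the rewrite author's own statement) =====
-- stated objective: simpler
-- what changed: Each non-code segment is escaped in a single left-to-right character scan against a precomputed set (segments collected and joined once), instead of 18 consecutive full-string str.replace passes with repeated string concatenation.
import Mathlib
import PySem

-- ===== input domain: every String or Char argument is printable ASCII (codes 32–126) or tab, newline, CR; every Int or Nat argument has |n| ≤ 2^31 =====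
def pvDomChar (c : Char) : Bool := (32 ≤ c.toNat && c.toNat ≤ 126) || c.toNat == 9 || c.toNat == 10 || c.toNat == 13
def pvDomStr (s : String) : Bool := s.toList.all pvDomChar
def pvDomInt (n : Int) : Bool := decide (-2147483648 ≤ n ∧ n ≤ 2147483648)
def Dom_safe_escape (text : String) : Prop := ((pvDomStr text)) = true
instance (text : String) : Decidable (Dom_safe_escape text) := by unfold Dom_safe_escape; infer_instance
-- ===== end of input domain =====

-- B escapes each non-code segment in one character scan against a set instead of A's 18 str.replace passes.

-- ===== PORT A =====
def escChars : List Char := "_*[]()~>#+-=|{}.!".toList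

def safe_escape (text : String) : String :=
  if text.toList.isEmpty then "" else
  let parts := PySem.Chars.splitOn text.toList "```".toList
  let final := (parts.foldl (fun (st : Nat × List Char) part =>
    (st.1 + 1,
      if st.1 % 2 == 0 then
        st.2 ++ escChars.foldl (fun p ch => PySem.Chars.replace p [ch] ['\\', ch]) part
      else
        st.2 ++ "```\n".toList ++ part ++ "\n```".toList)) (0, ([] : List Char))).2
  String.ofList final

-- ===== PORT B =====
def escSet : PySem.Set Char := PySem.Set.ofList "_*[]()~>#+-=|{}.!".toList

def safe_escape_alt (text : String) : String :=
  if text.toList.isEmpty then "" else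
  let out := ((PySem.Chars.splitOn text.toList "```".toList).foldl
    (fun (st : Nat × List (List Char)) part =>
      (st.1 + 1,
        if st.1 % 2 == 1 then
          st.2 ++ ["```\n".toList ++ part ++ "\n```".toList]
        else
          st.2 ++ [part.flatMap (fun c => if c ∈ escSet then ['\\', c] else [c])]))
    (0, ([] : List (List Char)))).2
  String.ofList (PySem.Chars.join [] out)

-- ===== PRECONDITION & SPEC =====
def Spec_safe_escape (text : String) (out : String) : Prop := out = safe_escape_alt text
instance (text : String) (out : String) : Decidable (Spec_safe_escape text out) := by unfold Spec_safe_escape; infer_instance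

-- ===== CLAIM (what is proved, stated in full; the proofs are below) =====
def Claim_equal_safe_escape : Prop := ∀ (text : String), Dom_safe_escape text → Spec_safe_escape text (safe_escape text)

-- ===== LEMMAS AND PROOFS =====

lemma replace_go_single (c : Char) (new : List Char) :
    ∀ (s : List Char) (fuel : Nat) (acc : List Char), s.length ≤ fuel →
    PySem.Chars.replace.go [c] new fuel s acc =
      acc.reverse ++ s.flatMap (fun x => if x = c then new else [x]) := by
  intro s
  induction s with
  | nil =>
    intro fuel acc _
    cases fuel <;> simp [PySem.Chars.replace.go]
  | cons x t ih =>
    intro fuel acc h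
    cases fuel with
    | zero => simp at h
    | succ m =>
      simp only [PySem.Chars.replace.go]
      by_cases hx : x = c
      · subst hx
        have hpre : List.isPrefixOf [x] (x :: t) = true := by simp [List.isPrefixOf]
        simp only [hpre, if_pos]
        rw [show List.drop (List.length [x]) (x :: t) = t by simp]
        rw [ih m (new.reverse ++ acc) (by simpa using h)]
        simp
      · have hpre : List.isPrefixOf [c] (x :: t) = false := by
          simp [List.isPrefixOf]
          intro hc; exact hx hc.symm
        simp only [hpre, Bool.false_eq_true, if_neg, not_false_iff]
        rw [ih m (x :: acc) (by simpa using h)]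
        simp [hx]

lemma replace_single (c : Char) (new s : List Char) :
    PySem.Chars.replace s [c] new = s.flatMap (fun x => if x = c then new else [x]) := by
  rw [PySem.Chars.replace]
  simp only [List.isEmpty_cons, Bool.false_eq_true, if_neg, not_false_iff]
  simpa using replace_go_single c new s s.length [] (le_refl _)

lemma chain_eq (cs : List Char) (hb : '\\' ∉ cs) (hn : cs.Nodup) :
    ∀ s : List Char,
      cs.foldl (fun p ch => PySem.Chars.replace p [ch] ['\\', ch]) s
        = s.flatMap (fun x => if x ∈ cs then ['\\', x] else [x]) := by
  induction cs with
  | nil => intro s; simp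
  | cons c cs ih =>
    intro s
    have hb' : '\\' ∉ cs := fun h => hb (List.mem_cons_of_mem _ h)
    have hbc : '\\' ≠ c := fun h => hb (h ▸ List.mem_cons_self)
    have hcn : c ∉ cs := (List.nodup_cons.mp hn).1
    have hn' : cs.Nodup := (List.nodup_cons.mp hn).2
    rw [List.foldl_cons, replace_single, ih hb' hn', List.flatMap_assoc]
    apply List.flatMap_congr
    intro x _
    by_cases hx : x = c
    · subst hx
      simp [hb', hcn]
    · simp [hx, List.mem_cons]

lemma part_eq (part : List Char) :
    escChars.foldl (fun p ch => PySem.Chars.replace p [ch] ['\\', ch]) part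
      = part.flatMap (fun c => if c ∈ escSet then ['\\', c] else [c]) := by
  have hset : escSet = escChars := by decide
  rw [chain_eq escChars (by decide) (by decide), hset]

lemma join_nil_eq_flatten : ∀ l : List (List Char), PySem.Chars.join [] l = l.flatten := by
  intro l
  induction l with
  | nil => simp [PySem.Chars.join_nil]
  | cons p rest ih =>
    cases rest with
    | nil => simp [PySem.Chars.join_singleton]
    | cons q rest' =>
      rw [PySem.Chars.join_cons_cons]
      simp [ih]

lemma loop_eq (parts : List (List Char)) :
    ∀ (i : Nat) (a : List Char) (b : List (List Char)), a = b.flatten →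
    (parts.foldl (fun (st : Nat × List Char) part =>
      (st.1 + 1,
        if st.1 % 2 == 0 then
          st.2 ++ escChars.foldl (fun p ch => PySem.Chars.replace p [ch] ['\\', ch]) part
        else
          st.2 ++ "```\n".toList ++ part ++ "\n```".toList)) (i, a)).2
    = ((parts.foldl (fun (st : Nat × List (List Char)) part =>
        (st.1 + 1,
          if st.1 % 2 == 1 then
            st.2 ++ ["```\n".toList ++ part ++ "\n```".toList]
          else
            st.2 ++ [part.flatMap (fun c => if c ∈ escSet then ['\\', c] else [c])]))
        (i, b)).2).flatten := by
  induction parts with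
  | nil => intro i a b hab; simpa using hab
  | cons part rest ih =>
    intro i a b hab
    rw [List.foldl_cons, List.foldl_cons]
    rcases Nat.mod_two_eq_zero_or_one i with h | h
    · simp only [h]
      exact ih (i + 1) _ _ (by rw [part_eq, hab]; simp)
    · simp only [h]
      exact ih (i + 1) _ _ (by rw [hab]; simp)

-- ===== VERDICT (by name: the statement is the Claim_ definition above) =====
theorem safe_escape_spec : Claim_equal_safe_escape := by
  intro text _
  unfold Spec_safe_escape safe_escape safe_escape_alt
  by_cases h : text.toList.isEmpty
  · simp [h]
  · simp only [h, Bool.false_eq_true, if_neg, not_false_iff]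
    congr 1
    rw [join_nil_eq_flatten]
    exact loop_eq _ 0 [] [] rfl
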